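-- pv_equiv track=rewrite | github.com/wickai/fibonacci_wave_2d | backend/batch_operate.py | is_rotation_repeat_equal
-- ===== SOURCE A (Python) =====
-- from typing import Dict, List, Tuple, Any
--
-- def is_rotation_repeat_equal(result: List[int], base_seq: List[int]) -> bool:
--     sLen = len(base_seq)
--     if sLen == 0 or len(result) % sLen != 0:
--         return False
--     for r in range(sLen):
--         ok = True
--         for i in range(len(result)):
--             if result[i] != base_seq[(i + r) % sLen]:
--                 ok = False
--                 break
--         if ok:
--             return True
--     return False
-- ===== SOURCE B (Python) =====
-- def is_rotation_repeat_equal(result, base_seq):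
--     m = len(base_seq)
--     if m == 0 or len(result) % m != 0:
--         return False
--     # one pass: result must be periodic with period m
--     for i in range(m, len(result)):
--         if result[i] != result[i - m]:
--             return False
--     # then the first block must occur in the doubled base sequence (rotation check)
--     block = result[:m]
--     doubled = base_seq + base_seq
--     for j in range(len(doubled) - len(block) + 1):
--         if all(doubled[j + t] == block[t] for t in range(len(block))):
--             return True
--     return False
-- ===== Notes on version B (the rewrite author's own statement) =====
-- stated objective: alternative
-- what changed: Instead of re-scanning all of result for each of the sLen rotations, B makes one pass checking period-sLen periodicity of result and then only matches the first block against a sliding window of the doubled base sequence.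
import Mathlib
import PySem

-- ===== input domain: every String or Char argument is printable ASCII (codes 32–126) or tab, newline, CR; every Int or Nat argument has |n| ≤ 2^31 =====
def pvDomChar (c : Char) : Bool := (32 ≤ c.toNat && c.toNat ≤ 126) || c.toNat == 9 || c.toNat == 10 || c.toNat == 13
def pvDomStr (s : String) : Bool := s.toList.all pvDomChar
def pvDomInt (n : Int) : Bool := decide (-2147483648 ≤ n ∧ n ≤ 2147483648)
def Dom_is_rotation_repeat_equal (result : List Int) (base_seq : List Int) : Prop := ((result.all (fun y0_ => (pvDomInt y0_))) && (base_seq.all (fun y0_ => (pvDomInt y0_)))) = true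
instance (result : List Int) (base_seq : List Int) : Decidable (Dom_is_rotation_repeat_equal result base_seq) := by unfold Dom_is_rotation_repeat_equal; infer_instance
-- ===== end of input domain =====

-- B replaces A's scan of all of result per rotation by one periodicity pass plus a block match in the doubled base sequence.


-- ===== PORT A =====
def is_rotation_repeat_equal (result : List Int) (base_seq : List Int) : Bool :=
  let sLen : Int := base_seq.length
  if sLen == 0 || PySem.Int.mod (result.length : Int) sLen != 0 then false
  else
    (PySem.List.pyRange 0 sLen 1).any fun r =>
      (PySem.List.pyRange 0 (result.length : Int) 1).all fun i =>
        PySem.List.pyGetD result i 0 == PySem.List.pyGetD base_seq (PySem.Int.mod (i + r) sLen) 0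

-- ===== PORT B =====
def is_rotation_repeat_equal_alt (result : List Int) (base_seq : List Int) : Bool :=
  let m : Int := base_seq.length
  if m == 0 || PySem.Int.mod (result.length : Int) m != 0 then false
  else if !((PySem.List.pyRange m (result.length : Int) 1).all fun i =>
      PySem.List.pyGetD result i 0 == PySem.List.pyGetD result (i - m) 0) then false
  else
    let block := PySem.List.slice result (some 0) (some m)
    let doubled := base_seq ++ base_seq
    (PySem.List.pyRange 0 ((doubled.length : Int) - (block.length : Int) + 1) 1).any fun j =>
      (PySem.List.pyRange 0 (block.length : Int) 1).all fun t =>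
        PySem.List.pyGetD doubled (j + t) 0 == PySem.List.pyGetD block t 0

-- ===== PRECONDITION & SPEC =====
def Spec_is_rotation_repeat_equal (result : List Int) (base_seq : List Int) (out : Bool) : Prop := out = is_rotation_repeat_equal_alt result base_seq
instance (result : List Int) (base_seq : List Int) (out : Bool) : Decidable (Spec_is_rotation_repeat_equal result base_seq out) := by unfold Spec_is_rotation_repeat_equal; infer_instance

-- ===== CLAIM (what is proved, stated in full; the proofs are below) =====
def Claim_equal_is_rotation_repeat_equal : Prop := ∀ (result : List Int) (base_seq : List Int), Dom_is_rotation_repeat_equal result base_seq → Spec_is_rotation_repeat_equal result base_seq (is_rotation_repeat_equal result base_seq)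

-- ===== LEMMAS AND PROOFS =====

-- A's search, at the Nat level: some rotation r of base_seq, repeated, matches result
def PropA (result base_seq : List Int) : Prop :=
  ∃ r, r < base_seq.length ∧ ∀ i, i < result.length →
    result.getD i 0 = base_seq.getD ((i + r) % base_seq.length) 0

-- B's two phases, at the Nat level: periodicity, then block occurrence in the doubled base
def PropB (result base_seq : List Int) : Prop :=
  (∀ i, base_seq.length ≤ i → i < result.length →
      result.getD i 0 = result.getD (i - base_seq.length) 0)
  ∧ ∃ j, j < 2 * base_seq.length - min base_seq.length result.length + 1 ∧
      ∀ t, t < min base_seq.length result.length →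
        (base_seq ++ base_seq).getD (j + t) 0 = (result.take base_seq.length).getD t 0

lemma take_getD (l : List Int) (m k : Nat) (hk : k < m) (hkl : k < l.length) :
    (l.take m).getD k 0 = l.getD k 0 := by
  rw [List.getD_eq_getElem _ _ (by simp; omega), List.getD_eq_getElem _ _ hkl]
  simp

lemma doubled_getD (base : List Int) (p : Nat) (hp : p < 2 * base.length) :
    (base ++ base).getD p 0 = base.getD (p % base.length) 0 := by
  rcases lt_or_ge p base.length with h | h
  · rw [Nat.mod_eq_of_lt h, List.getD_append _ _ _ _ h]
  · have hpm : p - base.length < base.length := by omega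
    rw [Nat.mod_eq_sub_mod h, Nat.mod_eq_of_lt hpm, List.getD_append_right _ _ _ _ h]

lemma period_getD (result : List Int) (m : Nat) (hm : 0 < m)
    (hper : ∀ i, m ≤ i → i < result.length → result.getD i 0 = result.getD (i - m) 0) :
    ∀ i, i < result.length → result.getD i 0 = result.getD (i % m) 0 := by
  intro i
  induction i using Nat.strong_induction_on with
  | _ i ih =>
    intro hi
    rcases lt_or_ge i m with h | h
    · rw [Nat.mod_eq_of_lt h]
    · rw [hper i h hi, ih (i - m) (by omega) (by omega), Nat.mod_eq_sub_mod h]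

lemma key_iff (result base : List Int) (hm : 0 < base.length)
    (hdvd : base.length ∣ result.length) :
    PropA result base ↔ PropB result base := by
  rcases Nat.eq_zero_or_pos result.length with hn0 | hnpos
  · have hres : result = [] := List.length_eq_zero_iff.mp hn0
    subst hres
    constructor
    · intro _
      refine ⟨fun i h1 h2 => absurd h2 (by simp), 0, by simp, fun t ht => absurd ht (by simp)⟩
    · intro _
      exact ⟨0, hm, fun i hi => absurd hi (by simp)⟩
  · have hmn : base.length ≤ result.length := Nat.le_of_dvd hnpos hdvd
    have hminmn : min base.length result.length = base.length := Nat.min_eq_left hmn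
    constructor
    · rintro ⟨r, hrm, hall⟩
      refine ⟨fun i h1 h2 => ?_, r, ?_, ?_⟩
      · have h3 : (i + r) % base.length = (i - base.length + r) % base.length := by
          rw [show i + r = (i - base.length + r) + base.length by omega, Nat.add_mod_right]
        rw [hall i h2, hall (i - base.length) (by omega), h3]
      · rw [hminmn]; omega
      · rw [hminmn]
        intro t ht
        calc (base ++ base).getD (r + t) 0
            = base.getD ((r + t) % base.length) 0 := doubled_getD _ _ (by omega)
          _ = result.getD t 0 := by
              rw [Nat.add_comm r t]; exact (hall t (by omega)).symm
          _ = (result.take base.length).getD t 0 :=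
              (take_getD _ _ _ ht (by omega)).symm
    · rintro ⟨hper, j, hj, hblock⟩
      rw [hminmn] at hj hblock
      have hjm : j ≤ base.length := by omega
      refine ⟨j % base.length, Nat.mod_lt _ hm, fun i hi => ?_⟩
      have him : i % base.length < base.length := Nat.mod_lt _ hm
      calc result.getD i 0
          = result.getD (i % base.length) 0 := period_getD result base.length hm hper i hi
        _ = (result.take base.length).getD (i % base.length) 0 :=
            (take_getD _ _ _ him (by omega)).symm
        _ = (base ++ base).getD (j + i % base.length) 0 := (hblock _ him).symm
        _ = base.getD ((j + i % base.length) % base.length) 0 := doubled_getD _ _ (by omega)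
        _ = base.getD ((i + j % base.length) % base.length) 0 := by
            rw [Nat.add_mod_mod, Nat.add_mod_mod, Nat.add_comm]

lemma portA_iff (result base : List Int) (hm : base.length ≠ 0)
    (hdvd : base.length ∣ result.length) :
    is_rotation_repeat_equal result base = true ↔ PropA result base := by
  have hm' : (base.length : Int) ≠ 0 := by exact_mod_cast hm
  have hne : base ≠ [] := fun h => hm (by simp [h])
  have hg : PySem.Int.mod (result.length : Int) (base.length : Int) = 0 := by
    obtain ⟨k, hk⟩ := hdvd
    rw [PySem.Int.mod_natCast, hk, Nat.mul_mod_right]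
    rfl
  simp only [is_rotation_repeat_equal]
  rw [if_neg (by simp [hne, hg])]
  simp only [List.any_eq_true, List.all_eq_true, PySem.List.mem_pyRange_one, beq_iff_eq]
  unfold PropA
  constructor
  · rintro ⟨r, ⟨hr0, hrm⟩, hall⟩
    refine ⟨r.toNat, by omega, fun i hi => ?_⟩
    have h := hall (i : Int) ⟨by positivity, by exact_mod_cast hi⟩
    rw [show (i : Int) + r = ((i + r.toNat : Nat) : Int) by omega,
      PySem.Int.mod_natCast, PySem.List.pyGetD_natCast, PySem.List.pyGetD_natCast] at h
    exact h
  · rintro ⟨r, hrm, hall⟩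
    refine ⟨(r : Int), ⟨by positivity, by exact_mod_cast hrm⟩, fun i hi => ?_⟩
    obtain ⟨hi0, hin⟩ := hi
    have h := hall i.toNat (by omega)
    rw [show (i : Int) = ((i.toNat : Nat) : Int) by omega]
    rw [show ((i.toNat : Nat) : Int) + (r : Int) = ((i.toNat + r : Nat) : Int) by omega,
      PySem.Int.mod_natCast, PySem.List.pyGetD_natCast, PySem.List.pyGetD_natCast]
    exact h

lemma portB_iff (result base : List Int) (hm : base.length ≠ 0)
    (hdvd : base.length ∣ result.length) :
    is_rotation_repeat_equal_alt result base = true ↔ PropB result base := by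
  have hm' : (base.length : Int) ≠ 0 := by exact_mod_cast hm
  have hne : base ≠ [] := fun h => hm (by simp [h])
  have hg : PySem.Int.mod (result.length : Int) (base.length : Int) = 0 := by
    obtain ⟨k, hk⟩ := hdvd
    rw [PySem.Int.mod_natCast, hk, Nat.mul_mod_right]
    rfl
  have hbl : PySem.List.slice result (some 0) (some (base.length : Int))
      = result.take base.length := by
    rw [PySem.List.slice_zero_start, PySem.List.slice_to_natCast]
  have h2len : (base ++ base).length = 2 * base.length := by
    simp [Nat.two_mul]
  have hminle : min base.length result.length ≤ base.length := Nat.min_le_left _ _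
  have hcIff : ((PySem.List.pyRange (base.length : Int) (result.length : Int) 1).all
        (fun i => PySem.List.pyGetD result i 0
          == PySem.List.pyGetD result (i - (base.length : Int)) 0)) = true
      ↔ (∀ i, base.length ≤ i → i < result.length →
          result.getD i 0 = result.getD (i - base.length) 0) := by
    simp only [List.all_eq_true, PySem.List.mem_pyRange_one, beq_iff_eq]
    constructor
    · intro H i h1 h2
      have h := H (i : Int) ⟨by exact_mod_cast h1, by exact_mod_cast h2⟩
      rw [show (i : Int) - (base.length : Int) = ((i - base.length : Nat) : Int) by omega,
        PySem.List.pyGetD_natCast, PySem.List.pyGetD_natCast] at h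
      exact h
    · intro H x hx
      obtain ⟨hx1, hx2⟩ := hx
      have h := H x.toNat (by omega) (by omega)
      rw [show x = ((x.toNat : Nat) : Int) by omega]
      rw [show ((x.toNat : Nat) : Int) - (base.length : Int)
            = ((x.toNat - base.length : Nat) : Int) by omega,
        PySem.List.pyGetD_natCast, PySem.List.pyGetD_natCast]
      exact h
  have hdIff : ((PySem.List.pyRange 0
        (((2 * base.length : Nat) : Int) - ((min base.length result.length : Nat) : Int) + 1) 1).any
        (fun j => (PySem.List.pyRange 0 ((min base.length result.length : Nat) : Int) 1).all
          (fun t => PySem.List.pyGetD (base ++ base) (j + t) 0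
            == PySem.List.pyGetD (result.take base.length) t 0))) = true
      ↔ (∃ j, j < 2 * base.length - min base.length result.length + 1 ∧
          ∀ t, t < min base.length result.length →
            (base ++ base).getD (j + t) 0 = (result.take base.length).getD t 0) := by
    simp only [List.any_eq_true, List.all_eq_true, PySem.List.mem_pyRange_one, beq_iff_eq]
    constructor
    · rintro ⟨x, ⟨hx0, hxlt⟩, hall⟩
      refine ⟨x.toNat, by omega, fun t ht => ?_⟩
      have h := hall (t : Int) ⟨by positivity, by exact_mod_cast ht⟩
      rw [show x + (t : Int) = ((x.toNat + t : Nat) : Int) by omega,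
        PySem.List.pyGetD_natCast, PySem.List.pyGetD_natCast] at h
      exact h
    · rintro ⟨j, hj, hall⟩
      refine ⟨(j : Int), ⟨by positivity, by omega⟩, fun t ht => ?_⟩
      obtain ⟨ht0, htlt⟩ := ht
      have h := hall t.toNat (by omega)
      rw [show t = ((t.toNat : Nat) : Int) by omega]
      rw [show (j : Int) + ((t.toNat : Nat) : Int) = ((j + t.toNat : Nat) : Int) by omega,
        PySem.List.pyGetD_natCast, PySem.List.pyGetD_natCast]
      exact h
  simp only [is_rotation_repeat_equal_alt]
  rw [if_neg (by simp [hne, hg])]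
  rw [hbl]
  simp only [List.length_take, h2len]
  unfold PropB
  cases hc : (PySem.List.pyRange (base.length : Int) (result.length : Int) 1).all
      (fun i => PySem.List.pyGetD result i 0
        == PySem.List.pyGetD result (i - (base.length : Int)) 0) with
  | false =>
    simp only [Bool.not_false, if_true]
    constructor
    · intro h; exact absurd h (by simp)
    · rintro ⟨hper, -⟩
      have hT := hcIff.mpr hper
      rw [hc] at hT
      exact (Bool.false_ne_true hT).elim
  | true =>
    rw [if_neg (by simp)]
    rw [hdIff]
    constructor
    · intro hocc; exact ⟨hcIff.mp hc, hocc⟩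
    · rintro ⟨-, hocc⟩; exact hocc

-- ===== VERDICT (by name: the statement is the Claim_ definition above) =====
theorem is_rotation_repeat_equal_spec : Claim_equal_is_rotation_repeat_equal := by
  intro result base _
  unfold Spec_is_rotation_repeat_equal
  by_cases hm : base.length = 0
  · simp [is_rotation_repeat_equal, is_rotation_repeat_equal_alt, hm]
  · by_cases hmod : PySem.Int.mod (result.length : Int) (base.length : Int) = 0
    · have hdvd : base.length ∣ result.length := by
        rw [PySem.Int.mod_natCast] at hmod
        have : result.length % base.length = 0 := by exact_mod_cast hmod
        exact Nat.dvd_of_mod_eq_zero this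
      rw [Bool.eq_iff_iff, portA_iff result base hm hdvd, portB_iff result base hm hdvd]
      exact key_iff result base (Nat.pos_of_ne_zero hm) hdvd
    · have hnd : ¬ ((base.length : Int) ∣ (result.length : Int)) := fun h =>
        hmod (by rw [PySem.Int.mod_eq_zero_iff_dvd]; exact h)
      simp [is_rotation_repeat_equal, is_rotation_repeat_equal_alt, hm, hnd]
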